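-- pv_equiv track=rewrite | github.com/mark-torres10/redditResearch | src/services/classify_comments/preprocess/strings.py | modify_pos
-- ===== SOURCE A (Python) =====
-- from typing import Any, Dict, List, Optional, Tuple
--
-- def modify_pos(dict: Dict) -> Dict:
--     result_dic: Dict = {}
--     for key in dict.keys():
--         if key.startswith("J"):
--             if "adj" in result_dic:
--                 result_dic["adj"] += dict[key]
--             else:
--                 result_dic["adj"] = dict[key]
--         elif key.startswith("V"):
--             if "verb" in result_dic:
--                 result_dic["verb"] += dict[key]
--             else:
--                 result_dic["verb"] = dict[key]
--         elif key.startswith("N"):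
--             if "noun" in result_dic:
--                 result_dic["noun"] += dict[key]
--             else:
--                 result_dic["noun"] = dict[key]
--         elif key.startswith("R"):
--             if "adv" in result_dic:
--                 result_dic["adv"] += dict[key]
--             else:
--                 result_dic["adv"] = dict[key]
--         elif key in ["PRP", "PRP$"]:
--             if "pronoun" in result_dic:
--                 result_dic["pronoun"] += dict[key]
--             else:
--                 result_dic["pronoun"] = dict[key]
--         elif key.startswith("W"):
--             if "wh" in result_dic:
--                 result_dic["wh"] += dict[key]
--             else:
--                 result_dic["wh"] = dict[key]
--         else:
--             if "other" in result_dic: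
--                 result_dic["other"] += dict[key]
--             else:
--                 result_dic["other"] = dict[key]
--     return result_dic
-- ===== SOURCE B (Python) =====
-- # Two-phase group-by rewrite: classify every entry once into (category, value)
-- # pairs, then build the result per category (first-appearance order, summed),
-- # instead of A's single pass that mutates an accumulator dict entry by entry.
-- _PREFIXES = (("J", "adj"), ("V", "verb"), ("N", "noun"), ("R", "adv"), ("W", "wh"))
--
-- def _category(key):
--     if key in ("PRP", "PRP$"):
--         return "pronoun"
--     for p, c in _PREFIXES:
--         if key.startswith(p):
--             return c
--     return "other"
--
-- def modify_pos(dict):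
--     pairs = [(_category(k), v) for k, v in dict.items()]
--     order = []
--     for c, _ in pairs:
--         if c not in order:
--             order.append(c)
--     return {c: sum(v for cc, v in pairs if cc == c) for c in order}
-- ===== Notes on version B (the rewrite author's own statement) =====
-- stated objective: alternative
-- what changed: A's single pass that mutates a result dict per entry (seven if/elif blocks each with its own if-in-else accumulation) is replaced by a two-phase group-by: first map every entry to a (category, value) pair, then emit one (category, sum of its values) per category in first-appearance order.
import Mathlib
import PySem

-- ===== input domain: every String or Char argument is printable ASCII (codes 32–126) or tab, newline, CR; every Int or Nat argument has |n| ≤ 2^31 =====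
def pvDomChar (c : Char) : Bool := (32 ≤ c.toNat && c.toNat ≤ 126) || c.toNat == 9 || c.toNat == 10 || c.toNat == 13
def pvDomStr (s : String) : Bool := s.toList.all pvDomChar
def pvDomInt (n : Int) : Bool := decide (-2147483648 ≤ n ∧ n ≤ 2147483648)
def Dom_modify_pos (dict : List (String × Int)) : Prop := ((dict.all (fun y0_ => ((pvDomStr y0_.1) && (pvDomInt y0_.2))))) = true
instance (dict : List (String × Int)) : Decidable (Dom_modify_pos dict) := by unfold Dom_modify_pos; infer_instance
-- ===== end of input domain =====

-- B replaces A's single entry-by-entry accumulation pass by a two-phase group-by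
-- (classify to (category, value) pairs, then one (category, sum) per category in
-- first-appearance order); objective: alternative decomposition.
-- ===== PORT A =====
-- the Python dict argument arrives as an association list; PySem.Dict.ofList reproduces
-- dict construction (last value wins, first-insertion key order); iterating d.items gives
-- keys() with dict[key] = the pair's value (keys are unique after ofList)
def modify_pos (dict : List (String × Int)) : List (String × Int) :=
  let d := PySem.Dict.ofList dict
  (d.items.foldl (fun r kv =>
    let key := kv.1
    let v := kv.2
    if PySem.Str.startswith key "J" then
      (if r.contains "adj" then r.insert "adj" (r.getD "adj" 0 + v) else r.insert "adj" v)
    else if PySem.Str.startswith key "V" then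
      (if r.contains "verb" then r.insert "verb" (r.getD "verb" 0 + v) else r.insert "verb" v)
    else if PySem.Str.startswith key "N" then
      (if r.contains "noun" then r.insert "noun" (r.getD "noun" 0 + v) else r.insert "noun" v)
    else if PySem.Str.startswith key "R" then
      (if r.contains "adv" then r.insert "adv" (r.getD "adv" 0 + v) else r.insert "adv" v)
    else if key = "PRP" ∨ key = "PRP$" then
      (if r.contains "pronoun" then r.insert "pronoun" (r.getD "pronoun" 0 + v) else r.insert "pronoun" v)
    else if PySem.Str.startswith key "W" then
      (if r.contains "wh" then r.insert "wh" (r.getD "wh" 0 + v) else r.insert "wh" v)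
    else
      (if r.contains "other" then r.insert "other" (r.getD "other" 0 + v) else r.insert "other" v))
    PySem.Dict.empty).items

-- ===== PORT B =====
def pvPrefixes : List (String × String) :=
  [("J", "adj"), ("V", "verb"), ("N", "noun"), ("R", "adv"), ("W", "wh")]

def pvCategory (key : String) : String :=
  if key = "PRP" ∨ key = "PRP$" then "pronoun"
  else (((pvPrefixes.find? (fun p => PySem.Str.startswith key p.1)).map (·.2)).getD "other")

def modify_pos_alt (dict : List (String × Int)) : List (String × Int) :=
  let pairs := (PySem.Dict.ofList dict).items.map (fun kv => (pvCategory kv.1, kv.2))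
  let order := pairs.foldl (fun s p => PySem.Set.add s p.1) PySem.Set.empty
  order.map (fun c => (c, ((pairs.filter (fun p => p.1 == c)).map (·.2)).sum))

-- ===== PRECONDITION & SPEC =====
def Spec_modify_pos (dict : List (String × Int)) (out : List (String × Int)) : Prop := out = modify_pos_alt dict
instance (dict : List (String × Int)) (out : List (String × Int)) : Decidable (Spec_modify_pos dict out) := by unfold Spec_modify_pos; infer_instance

-- ===== CLAIM (what is proved, stated in full; the proofs are below) =====
def Claim_equal_modify_pos : Prop := ∀ (dict : List (String × Int)), Dom_modify_pos dict → Spec_modify_pos dict (modify_pos dict)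

-- ===== LEMMAS AND PROOFS =====

-- "if cat in r: r[cat] += v else: r[cat] = v" is exactly "r[cat] = r.get(cat,0) + v"
lemma accum_eq (r : PySem.Dict String Int) (cat : String) (v : Int) :
    (if r.contains cat then r.insert cat (r.getD cat 0 + v) else r.insert cat v)
      = r.insert cat (r.getD cat 0 + v) := by
  cases h : r.contains cat with
  | true => simp
  | false => simp [PySem.Dict.getD_of_not_contains, h]

-- A's branch cascade performs exactly one accumulation at B's classifier's category
lemma step_eq (r : PySem.Dict String Int) (kv : String × Int) :
    (let key := kv.1
     let v := kv.2
     if PySem.Str.startswith key "J" then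
       (if r.contains "adj" then r.insert "adj" (r.getD "adj" 0 + v) else r.insert "adj" v)
     else if PySem.Str.startswith key "V" then
       (if r.contains "verb" then r.insert "verb" (r.getD "verb" 0 + v) else r.insert "verb" v)
     else if PySem.Str.startswith key "N" then
       (if r.contains "noun" then r.insert "noun" (r.getD "noun" 0 + v) else r.insert "noun" v)
     else if PySem.Str.startswith key "R" then
       (if r.contains "adv" then r.insert "adv" (r.getD "adv" 0 + v) else r.insert "adv" v)
     else if key = "PRP" ∨ key = "PRP$" then
       (if r.contains "pronoun" then r.insert "pronoun" (r.getD "pronoun" 0 + v) else r.insert "pronoun" v)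
     else if PySem.Str.startswith key "W" then
       (if r.contains "wh" then r.insert "wh" (r.getD "wh" 0 + v) else r.insert "wh" v)
     else
       (if r.contains "other" then r.insert "other" (r.getD "other" 0 + v) else r.insert "other" v))
      = r.insert (pvCategory kv.1) (r.getD (pvCategory kv.1) 0 + kv.2) := by
  obtain ⟨key, v⟩ := kv
  simp only
  by_cases hp : key = "PRP" ∨ key = "PRP$"
  · rcases hp with h | h <;> subst h <;>
      norm_num [pvCategory, PySem.Str.startswith, PySem.Chars.startswith] <;>
      exact accum_eq r "pronoun" v
  · simp only [pvCategory, if_neg hp, pvPrefixes]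
    by_cases hJ : PySem.Chars.startswith key.toList ['J'] = true
    · simp [List.find?, hJ, accum_eq]
    · by_cases hV : PySem.Chars.startswith key.toList ['V'] = true
      · simp [List.find?, hJ, hV, accum_eq]
      · by_cases hN : PySem.Chars.startswith key.toList ['N'] = true
        · simp [List.find?, hJ, hV, hN, accum_eq]
        · by_cases hR : PySem.Chars.startswith key.toList ['R'] = true
          · simp [List.find?, hJ, hV, hN, hR, accum_eq]
          · by_cases hW : PySem.Chars.startswith key.toList ['W'] = true
            · simp [List.find?, hJ, hV, hN, hR, hW, accum_eq]
            · simp [List.find?, hJ, hV, hN, hR, hW, accum_eq]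

-- value of A's accumulator at any category: initial value plus the sum of the
-- values of the entries classified to it
lemma getD_accum (l : List (String × Int)) (d : PySem.Dict String Int) (c : String) :
    (l.foldl (fun r kv => r.insert (pvCategory kv.1) (r.getD (pvCategory kv.1) 0 + kv.2)) d).getD c 0
      = d.getD c 0 + ((l.filter (fun kv => pvCategory kv.1 == c)).map (·.2)).sum := by
  induction l generalizing d with
  | nil => simp
  | cons kv t ih =>
    rw [List.foldl_cons, ih]
    by_cases h : pvCategory kv.1 = c
    · simp [h, PySem.Dict.getD_insert_self]
      ring
    · simp [h, PySem.Dict.getD_insert_of_ne _ _ _ (Ne.symm h)]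

theorem modify_pos_spec : Claim_equal_modify_pos := by
  intro dict _
  unfold Spec_modify_pos modify_pos modify_pos_alt
  dsimp only
  set l := (PySem.Dict.ofList dict).items with hl
  -- rewrite A's loop body via step_eq
  have hbody :
      l.foldl (fun r kv =>
        let key := kv.1
        let v := kv.2
        if PySem.Str.startswith key "J" then
          (if r.contains "adj" then r.insert "adj" (r.getD "adj" 0 + v) else r.insert "adj" v)
        else if PySem.Str.startswith key "V" then
          (if r.contains "verb" then r.insert "verb" (r.getD "verb" 0 + v) else r.insert "verb" v)
        else if PySem.Str.startswith key "N" then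
          (if r.contains "noun" then r.insert "noun" (r.getD "noun" 0 + v) else r.insert "noun" v)
        else if PySem.Str.startswith key "R" then
          (if r.contains "adv" then r.insert "adv" (r.getD "adv" 0 + v) else r.insert "adv" v)
        else if key = "PRP" ∨ key = "PRP$" then
          (if r.contains "pronoun" then r.insert "pronoun" (r.getD "pronoun" 0 + v) else r.insert "pronoun" v)
        else if PySem.Str.startswith key "W" then
          (if r.contains "wh" then r.insert "wh" (r.getD "wh" 0 + v) else r.insert "wh" v)
        else
          (if r.contains "other" then r.insert "other" (r.getD "other" 0 + v) else r.insert "other" v))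
        PySem.Dict.empty
      = l.foldl (fun r kv => r.insert (pvCategory kv.1) (r.getD (pvCategory kv.1) 0 + kv.2))
        PySem.Dict.empty := by
    exact PySem.List.foldl_congr_mem _ _ _ _ (fun r kv _ => step_eq r kv)
  rw [hbody]
  -- A's items are its keys paired with the accumulated values
  have hnd : (l.foldl (fun r kv => r.insert (pvCategory kv.1) (r.getD (pvCategory kv.1) 0 + kv.2))
      PySem.Dict.empty).keys.Nodup :=
    PySem.Dict.nodup_keys_foldl_insert_key l (fun kv => pvCategory kv.1) _ _
      PySem.Dict.nodup_keys_empty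
  rw [PySem.Dict.items_eq_map_keys _ hnd 0]
  rw [PySem.Dict.keys_foldl_insert_key]
  -- both orders are set(categories in order); both values are the per-category sums
  have horder : (l.map (fun kv => (pvCategory kv.1, kv.2))).foldl
      (fun s p => PySem.Set.add s p.1) PySem.Set.empty
      = PySem.Set.ofList (l.map fun kv => pvCategory kv.1) := by
    rw [List.foldl_map,
      ← PySem.Set.update_map_eq_foldl_add (f := fun kv : String × Int => pvCategory kv.1),
      PySem.Set.update_empty]
  rw [horder]
  simp only [PySem.Dict.keys_empty, PySem.Set.update_nil_left]
  apply List.map_congr_left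
  intro c _
  rw [getD_accum]
  simp only [PySem.Dict.getD_empty, zero_add, List.filter_map, List.map_map]
  rfl
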